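-- pv_equiv track=rewrite | github.com/Diffeomorphisme/AOC-24 | app/day7/day7.py | calculate_all_results
-- ===== SOURCE A (Python) =====
-- def calculate_all_results(numbers: list[int]) -> list[int]:
-- 	if len(numbers) == 1:
-- 		return [numbers[0]]
-- 	else:
-- 		all_results = calculate_all_results(numbers[:-1])
-- 		calculated_results = []
-- 		for result in all_results:
-- 			calculated_results.append(numbers[-1] + result)
-- 			calculated_results.append(numbers[-1] * result)
-- 		return calculated_results
-- ===== SOURCE B (Python) =====
-- def calculate_all_results(numbers: list[int]) -> list[int]:
-- 	results = [numbers[0]]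
-- 	for n in numbers[1:]:
-- 		results = [v for r in results for v in (n + r, n * r)]
-- 	return results
-- ===== Notes on version B (the rewrite author's own statement) =====
-- stated objective: simpler
-- what changed: Replaced the recursion on the list prefix (numbers[:-1]) by a single iterative left-to-right fold that rebuilds the results list for each number.
import Mathlib
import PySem

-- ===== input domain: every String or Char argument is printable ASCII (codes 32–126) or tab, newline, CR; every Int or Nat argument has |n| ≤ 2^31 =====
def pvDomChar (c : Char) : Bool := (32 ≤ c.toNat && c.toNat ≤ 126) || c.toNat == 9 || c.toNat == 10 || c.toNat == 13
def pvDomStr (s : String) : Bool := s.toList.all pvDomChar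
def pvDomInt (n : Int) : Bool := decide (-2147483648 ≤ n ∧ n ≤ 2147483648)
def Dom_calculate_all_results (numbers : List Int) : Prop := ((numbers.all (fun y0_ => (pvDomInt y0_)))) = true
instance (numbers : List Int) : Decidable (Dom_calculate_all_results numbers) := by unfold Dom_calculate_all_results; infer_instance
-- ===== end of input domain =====

-- B replaces A's recursion on numbers[:-1] by a single iterative left-to-right fold (objective: simpler).
-- Both raise on the empty list (A: RecursionError, B: IndexError), excluded by Pre_.

-- ===== PORT A =====
def calculate_all_results (numbers : List Int) : List Int :=
  if numbers.length = 1 then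
    [PySem.List.pyGetD numbers 0 0]   -- numbers[0]; in-range since length = 1
  else if numbers.length ≤ 1 then
    []  -- numbers = []: Python A recurses forever (RecursionError); outside Pre_, value arbitrary
  else
    let all_results := calculate_all_results (PySem.List.slice numbers none (some (-1)))  -- numbers[:-1]
    all_results.foldl
      (fun acc result =>
        acc ++ [PySem.List.pyGetD numbers (-1) 0 + result, PySem.List.pyGetD numbers (-1) 0 * result])
      []
termination_by numbers.length
decreasing_by
  simp [PySem.List.slice_to_neg_one]
  omega

-- ===== PORT B =====
def calculate_all_results_alt (numbers : List Int) : List Int :=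
  match numbers with
  | [] => []  -- numbers[0] raises IndexError in Source B; outside Pre_, value arbitrary
  | h :: t =>  -- results = [numbers[0]]; for n in numbers[1:]: results = [v for r in results for v in (n+r, n*r)]
    t.foldl (fun results n => results.flatMap (fun r => [n + r, n * r])) [h]

-- ===== PRECONDITION & SPEC =====
-- Pre_ excludes the empty list, on which Python A raises RecursionError (and B raises IndexError).
def Pre_calculate_all_results (numbers : List Int) : Prop := numbers ≠ []
instance (numbers : List Int) : Decidable (Pre_calculate_all_results numbers) := by unfold Pre_calculate_all_results; infer_instance
def pvWitness_calculate_all_results : List Int := ([2, 3, 5])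

def Spec_calculate_all_results (numbers : List Int) (out : List Int) : Prop := out = calculate_all_results_alt numbers
instance (numbers : List Int) (out : List Int) : Decidable (Spec_calculate_all_results numbers out) := by unfold Spec_calculate_all_results; infer_instance

-- ===== CLAIM (what is proved, stated in full; the proofs are below) =====
def Claim_equal_calculate_all_results : Prop := ∀ (numbers : List Int), Dom_calculate_all_results numbers → Pre_calculate_all_results numbers → Spec_calculate_all_results numbers (calculate_all_results numbers)

-- ===== LEMMAS AND PROOFS =====

-- A on a nonempty list h :: t equals B's fold over t starting from [h]
lemma calc_cons (h : Int) (t : List Int) :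
    calculate_all_results (h :: t) =
      t.foldl (fun results n => results.flatMap (fun r => [n + r, n * r])) [h] := by
  induction t using List.reverseRecOn with
  | nil => simp [calculate_all_results, PySem.List.pyGetD]
  | append_singleton t' n ih =>
    rw [calculate_all_results]
    have hlen : (h :: (t' ++ [n])).length = t'.length + 2 := by simp
    rw [if_neg (by omega), if_neg (by omega)]
    have hslice : PySem.List.slice (h :: (t' ++ [n])) none (some (-1)) = h :: t' := by
      rw [PySem.List.slice_to_neg_one,
        show h :: (t' ++ [n]) = (h :: t') ++ [n] from rfl, List.dropLast_concat]
    have hlast : PySem.List.pyGetD (h :: (t' ++ [n])) (-1) 0 = n := by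
      simp [pysem]
    rw [hslice, hlast, ih, List.foldl_append]
    simp [List.flatMap_def]

-- ===== VERDICT (by name: the statement is the Claim_ definition above) =====
theorem calculate_all_results_spec : Claim_equal_calculate_all_results := by
  intro numbers _ hpre
  unfold Spec_calculate_all_results
  cases numbers with
  | nil => exact absurd rfl hpre
  | cons h t => rw [calc_cons]; rfl
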